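-- pv_equiv track=rewrite | github.com/MicheleBellitti/AdventOfCode | 2023/day07/solution.py | replacements
-- ===== SOURCE A (Python) =====
-- def replacements(hand):
--     if hand == "":
--         return [""]
--     else:
--         return [
--         x+y
--         for x in ('23456789TQKA' if hand[0] == 'J' else hand[0])
--         for y in replacements(hand[1:])
--     ]
-- ===== SOURCE B (Python) =====
-- def replacements(hand):
--     tuples = [()]
--     for c in hand:
--         opts = '23456789TQKA' if c == 'J' else c
--         tuples = [t + (x,) for t in tuples for x in opts]
--     return [''.join(t) for t in tuples]
-- ===== Notes on version B (the rewrite author's own statement) =====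
-- stated objective: alternative
-- what changed: Replaced the recursion on the hand's tail with an iterative Cartesian-product accumulator: a single loop over the hand extends a list of tuples by each character's choices, and the tuples are joined into strings at the end.
import Mathlib
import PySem

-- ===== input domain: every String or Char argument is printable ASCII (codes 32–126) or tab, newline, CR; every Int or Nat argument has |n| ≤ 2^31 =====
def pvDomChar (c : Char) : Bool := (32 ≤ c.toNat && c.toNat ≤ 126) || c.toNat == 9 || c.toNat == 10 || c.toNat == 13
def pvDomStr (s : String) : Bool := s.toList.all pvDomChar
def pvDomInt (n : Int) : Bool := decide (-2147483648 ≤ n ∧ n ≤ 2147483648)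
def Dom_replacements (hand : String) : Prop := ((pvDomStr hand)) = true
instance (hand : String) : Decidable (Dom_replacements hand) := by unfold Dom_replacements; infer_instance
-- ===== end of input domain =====

-- B replaces A's recursion on the tail by an iterative Cartesian-product accumulator (alternative decomposition, same cost); return values only.

-- ===== PORT A =====
-- A recurses: empty hand -> [""], else prefix each choice for the first card to every replacement of the rest.
def replacementsA : List Char → List String
  | [] => [""]
  | c :: rest =>
      (if c = 'J' then "23456789TQKA".toList else [c]).flatMap
        (fun x => (replacementsA rest).map (fun y => String.ofList [x] ++ y))

def replacements (hand : String) : List String := replacementsA hand.toList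

-- ===== PORT B =====
-- B: one loop over the hand extends a list of char-tuples by each card's options, then joins.
def replacements_alt (hand : String) : List String :=
  (hand.toList.foldl
    (fun tuples c =>
      let opts := if c = 'J' then "23456789TQKA".toList else [c]
      tuples.flatMap (fun t => opts.map (fun x => t ++ [x])))
    [([] : List Char)]).map (fun t => String.ofList t)

-- ===== PRECONDITION & SPEC =====
def Spec_replacements (hand : String) (out : List String) : Prop := out = replacements_alt hand
instance (hand : String) (out : List String) : Decidable (Spec_replacements hand out) := by unfold Spec_replacements; infer_instance

-- ===== CLAIM (what is proved, stated in full; the proofs are below) =====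
def Claim_equal_replacements : Prop := ∀ (hand : String), Dom_replacements hand → Spec_replacements hand (replacements hand)

-- ===== LEMMAS AND PROOFS =====

-- tuples of choices, recursively (the common characterisation)
def pvTup : List Char → List (List Char)
  | [] => [[]]
  | c :: rest =>
      (if c = 'J' then "23456789TQKA".toList else [c]).flatMap
        (fun x => (pvTup rest).map (fun t => x :: t))

theorem mk_cons_append (x : Char) (t : List Char) :
    String.ofList [x] ++ String.ofList t = String.ofList (x :: t) := by
  rw [← String.ofList_append]; rfl

theorem repA_eq_tup (l : List Char) : replacementsA l = (pvTup l).map (fun t => String.ofList t) := by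
  induction l with
  | nil => rfl
  | cons c rest ih =>
      simp [replacementsA, pvTup, ih, List.map_flatMap, Function.comp_def, mk_cons_append]

theorem foldl_tup (l : List Char) (acc : List (List Char)) :
    l.foldl
      (fun tuples c =>
        let opts := if c = 'J' then "23456789TQKA".toList else [c]
        tuples.flatMap (fun t => opts.map (fun x => t ++ [x]))) acc
    = acc.flatMap (fun t => (pvTup l).map (fun u => t ++ u)) := by
  induction l generalizing acc with
  | nil => simp [pvTup]
  | cons c rest ih =>
      simp only [List.foldl_cons, ih, pvTup]
      simp [List.flatMap_assoc, List.map_flatMap, List.flatMap_map, Function.comp_def,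
        List.append_assoc]

theorem replacements_eq (hand : String) : replacements hand = replacements_alt hand := by
  unfold replacements replacements_alt
  rw [repA_eq_tup, foldl_tup]
  simp

-- ===== VERDICT (by name: the statement is the Claim_ definition above) =====
theorem replacements_spec : Claim_equal_replacements := by
  intro hand _
  unfold Spec_replacements
  exact replacements_eq hand
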